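-- pv_equiv track=rewrite | github.com/OscarTsao/CultureDx | src/culturedx/pipeline/runner.py | _predict_four_class
-- ===== SOURCE A (Python) =====
-- def _predict_four_class(codes: list[str]) -> str:
--     """Map ICD-10 codes to LingxiDiag 4-class label."""
--     has_dep = any(c.startswith("F32") or c.startswith("F33") for c in codes)
--     has_anx = any(c.startswith("F40") or c.startswith("F41") for c in codes)
--     if has_dep and has_anx:
--         return "Mixed"
--     if has_dep:
--         return "Depression"
--     if has_anx:
--         return "Anxiety"
--     return "Other"
-- ===== SOURCE B (Python) =====
-- def _predict_four_class(codes: list[str]) -> str: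
--     """Map ICD-10 codes to LingxiDiag 4-class label."""
--     mask = 0
--     for c in codes:
--         p = c[:3]
--         if p == "F32" or p == "F33":
--             mask |= 1
--         elif p == "F40" or p == "F41":
--             mask |= 2
--     return ("Other", "Depression", "Anxiety", "Mixed")[mask]
-- ===== Notes on version B (the rewrite author's own statement) =====
-- stated objective: alternative
-- what changed: B makes a single pass accumulating a 2-bit mask (bit 0 = F32/F33 prefix, bit 1 = F40/F41 prefix) and returns by indexing a 4-entry label table with the mask, replacing A's two separate any() scans and the Mixed/Depression/Anxiety/Other branch cascade.
import Mathlib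
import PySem

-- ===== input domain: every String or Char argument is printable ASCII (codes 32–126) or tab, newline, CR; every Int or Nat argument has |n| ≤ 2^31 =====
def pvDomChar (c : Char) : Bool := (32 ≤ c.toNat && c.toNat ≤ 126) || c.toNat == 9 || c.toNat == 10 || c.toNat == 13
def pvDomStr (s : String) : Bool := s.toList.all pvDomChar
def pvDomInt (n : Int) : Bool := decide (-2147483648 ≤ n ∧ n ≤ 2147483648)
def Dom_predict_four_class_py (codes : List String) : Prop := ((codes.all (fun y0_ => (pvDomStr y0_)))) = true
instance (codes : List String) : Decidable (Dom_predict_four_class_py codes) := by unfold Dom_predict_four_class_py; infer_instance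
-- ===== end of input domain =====

-- B replaces A's two any() scans and branch cascade by a single pass accumulating
-- a 2-bit mask and indexing a 4-entry label table (objective: alternative).

-- ===== PORT A =====
def predict_four_class_py (codes : List String) : String :=
  let has_dep := codes.any (fun c => PySem.Str.startswith c "F32" || PySem.Str.startswith c "F33")
  let has_anx := codes.any (fun c => PySem.Str.startswith c "F40" || PySem.Str.startswith c "F41")
  if has_dep && has_anx then "Mixed"
  else if has_dep then "Depression"
  else if has_anx then "Anxiety"
  else "Other"

-- ===== PORT B =====
def pvMaskStep (m : Nat) (c : String) : Nat :=
  let p := PySem.Str.slice c none (some 3)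
  if p == "F32" || p == "F33" then m ||| 1
  else if p == "F40" || p == "F41" then m ||| 2
  else m

def predict_four_class_py_alt (codes : List String) : String :=
  let mask := codes.foldl pvMaskStep 0
  -- mask is always ≤ 3, so the tuple index in Source B never raises; getD's default is unreachable
  (["Other", "Depression", "Anxiety", "Mixed"]).getD mask ""

-- ===== PRECONDITION & SPEC =====
def Spec_predict_four_class_py (codes : List String) (out : String) : Prop := out = predict_four_class_py_alt codes
instance (codes : List String) (out : String) : Decidable (Spec_predict_four_class_py codes out) := by unfold Spec_predict_four_class_py; infer_instance

-- ===== CLAIM (what is proved, stated in full; the proofs are below) =====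
def Claim_equal_predict_four_class_py : Prop := ∀ (codes : List String), Dom_predict_four_class_py codes → Spec_predict_four_class_py codes (predict_four_class_py codes)

-- ===== LEMMAS AND PROOFS =====

-- c.startswith(p) for a 3-char p is exactly c[:3] == p
theorem startswith_eq_slice3 (c p : String) (hp : p.toList.length = 3) :
    PySem.Str.startswith c p = (PySem.Str.slice c none (some 3) == p) := by
  have h1 : PySem.Str.startswith c p = true ↔ p.toList <+: c.toList := by
    simp [PySem.Str.startswith, PySem.Chars.startswith_iff]
  have hsl : (PySem.Str.slice c none (some 3)).toList = c.toList.take 3 := by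
    simp [pysem]
  rw [Bool.eq_iff_iff, h1, beq_iff_eq, ← String.toList_inj, hsl,
    List.prefix_iff_eq_take, hp]
  exact eq_comm

-- a 3-char prefix cannot be both a depression and an anxiety code
theorem prefix_not_both (p : String) (h : (p == "F32" || p == "F33") = true) :
    (p == "F40" || p == "F41") = false := by
  rcases (Bool.or_eq_true _ _).mp h with h' | h' <;> rw [beq_iff_eq] at h' <;> subst h' <;> decide

-- the single-pass fold computes the or of the start mask with the two scan bits
theorem mask_fold_gen (f g : String → Bool) (hfg : ∀ c, f c = true → g c = false)
    (codes : List String) (m : Nat) :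
    codes.foldl (fun m c => if f c then m ||| 1 else if g c then m ||| 2 else m) m =
      m ||| (if codes.any f then 1 else 0) ||| (if codes.any g then 2 else 0) := by
  induction codes generalizing m with
  | nil => simp
  | cons c t ih =>
    simp only [List.foldl_cons, List.any_cons, ih]
    rcases Bool.eq_false_or_eq_true (f c) with hf | hf
    · have hg := hfg c hf
      rcases Bool.eq_false_or_eq_true (t.any f) with hd | hd <;>
      rcases Bool.eq_false_or_eq_true (t.any g) with ha | ha <;>
        simp [hf, hg, hd, ha, Nat.lor_assoc]
    · rcases Bool.eq_false_or_eq_true (g c) with hg | hg <;>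
      rcases Bool.eq_false_or_eq_true (t.any f) with hd | hd <;>
      rcases Bool.eq_false_or_eq_true (t.any g) with ha | ha <;>
        simp [hf, hg, hd, ha, Nat.lor_assoc]

theorem mask_fold (codes : List String) (m : Nat) :
    codes.foldl pvMaskStep m =
      m ||| (if codes.any (fun c => PySem.Str.slice c none (some 3) == "F32"
                || PySem.Str.slice c none (some 3) == "F33") then 1 else 0)
        ||| (if codes.any (fun c => PySem.Str.slice c none (some 3) == "F40"
                || PySem.Str.slice c none (some 3) == "F41") then 2 else 0) := by
  have hstep : pvMaskStep = (fun m c =>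
      if (PySem.Str.slice c none (some 3) == "F32"
          || PySem.Str.slice c none (some 3) == "F33") then m ||| 1
      else if (PySem.Str.slice c none (some 3) == "F40"
          || PySem.Str.slice c none (some 3) == "F41") then m ||| 2
      else m) := by
    funext m c; simp only [pvMaskStep]
  rw [hstep]
  exact mask_fold_gen _ _ (fun c => prefix_not_both _) codes m

-- ===== VERDICT (by name: the statement is the Claim_ definition above) =====
theorem predict_four_class_py_spec : Claim_equal_predict_four_class_py := by
  intro codes _
  unfold Spec_predict_four_class_py predict_four_class_py predict_four_class_py_alt
  rw [mask_fold codes 0]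
  have hd : (fun c => PySem.Str.startswith c "F32" || PySem.Str.startswith c "F33")
      = (fun c => PySem.Str.slice c none (some 3) == "F32"
          || PySem.Str.slice c none (some 3) == "F33") := by
    funext c
    rw [startswith_eq_slice3 c "F32" (by decide), startswith_eq_slice3 c "F33" (by decide)]
  have ha : (fun c => PySem.Str.startswith c "F40" || PySem.Str.startswith c "F41")
      = (fun c => PySem.Str.slice c none (some 3) == "F40"
          || PySem.Str.slice c none (some 3) == "F41") := by
    funext c
    rw [startswith_eq_slice3 c "F40" (by decide), startswith_eq_slice3 c "F41" (by decide)]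
  rw [hd, ha]
  cases codes.any (fun c => PySem.Str.slice c none (some 3) == "F32"
      || PySem.Str.slice c none (some 3) == "F33") <;>
    cases codes.any (fun c => PySem.Str.slice c none (some 3) == "F40"
        || PySem.Str.slice c none (some 3) == "F41") <;> rfl
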